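-- pv_equiv track=rewrite | github.com/khan-walker/codeforces | monsters_attack.py | solve
-- ===== SOURCE A (Python) =====
-- def solve(n, k, a, x):
--     x = list(map(abs, x))
--     zippo = list(zip(x, a))
--     zippo.append((0, 0))
--     zippo.sort()
--     d = {}
--     for cor, health in zippo:
--         if cor in d:
--             d[cor] += health
--         else:
--             d[cor] = health
--     bullet = 0
--     key_list = list(d.keys())
--     for i in range(1, len(key_list)):
--         if d[key_list[i]] > (key_list[i] - key_list[i - 1]) * k + bullet:
--             return "NO"
--         bullet = (key_list[i] - key_list[i - 1]) * k + bullet - d[key_list[i]]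
--
--     return "YES"
-- ===== SOURCE B (Python) =====
-- def solve(n, k, a, x):
--     # No sorting, no dict, no running budget: the attack is survivable iff there is no
--     # monster at a coordinate c > 0 whose cumulative incoming health (all monsters with
--     # 0 < |pos| <= c) exceeds the k*c bullets fired before the wave passes c.
--     monsters = [(abs(p), h) for p, h in zip(x, a)]
--     for c, _ in monsters:
--         if c > 0 and sum(h for p, h in monsters if 0 < p <= c) > k * c:
--             return "NO"
--     return "YES"
-- ===== Notes on version B (the rewrite author's own statement) =====
-- stated objective: alternative
-- what changed: A sorts the whole (|x|,health) pair list with a (0,0) sentinel, rebuilds it as an ordered dict and sweeps the sorted keys with a running leftover-bullet recurrence and early return; B does no sorting and keeps no running state: for each monster at coordinate c>0 it directly recomputes the cumulative health of all monsters within distance c and tests it against the k*c bullet threshold, trading the O(n log n) sort-and-sweep for an O(n^2) stateless per-monster check.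
import Mathlib
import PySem

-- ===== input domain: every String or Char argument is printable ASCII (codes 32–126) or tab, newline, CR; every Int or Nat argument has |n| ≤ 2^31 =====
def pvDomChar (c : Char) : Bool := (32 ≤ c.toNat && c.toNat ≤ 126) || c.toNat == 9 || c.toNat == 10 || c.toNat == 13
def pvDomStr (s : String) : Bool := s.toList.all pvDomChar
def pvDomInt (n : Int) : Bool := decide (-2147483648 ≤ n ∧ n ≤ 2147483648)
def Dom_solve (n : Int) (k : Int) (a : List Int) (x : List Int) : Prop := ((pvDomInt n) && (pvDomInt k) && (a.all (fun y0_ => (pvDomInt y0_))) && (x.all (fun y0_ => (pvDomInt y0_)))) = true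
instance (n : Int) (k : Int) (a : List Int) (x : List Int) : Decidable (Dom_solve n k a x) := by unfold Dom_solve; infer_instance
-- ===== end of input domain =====

-- B replaces A's sort-with-sentinel + ordered-dict + running-bullet-budget sweep by a
-- stateless quadratic check: for each monster coordinate c>0, recompute the cumulative
-- health within distance c and compare it with the k*c bullet threshold (alternative).


-- ===== PORT A =====
def solve (_n : Int) (k : Int) (a : List Int) (x : List Int) : String :=
  let x' := x.map (fun v => |v|)
  let zippo := (x'.zip a) ++ [((0 : Int), (0 : Int))]
  let zs := PySem.List.sorted2 zippo (·.1) (·.2)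
  let d := zs.foldl (fun d p =>
      if d.contains p.1 then d.insert p.1 (d.getD p.1 0 + p.2)
      else d.insert p.1 p.2) PySem.Dict.empty
  let keyList := d.keys
  -- d[key_list[i]] lookups: every key_list[i] is a key of d, so getD 0 is exact
  let r := (PySem.List.pyRange 1 (keyList.length : Int) 1).foldl (fun st i =>
      match st with
      | Sum.inl s => Sum.inl s
      | Sum.inr bullet =>
        if d.getD (PySem.List.pyGetD keyList i 0) 0 >
            (PySem.List.pyGetD keyList i 0 - PySem.List.pyGetD keyList (i - 1) 0) * k + bullet
        then Sum.inl "NO"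
        else Sum.inr ((PySem.List.pyGetD keyList i 0 - PySem.List.pyGetD keyList (i - 1) 0) * k
              + bullet - d.getD (PySem.List.pyGetD keyList i 0) 0)) (Sum.inr (0 : Int))
  match r with
  | Sum.inl s => s
  | Sum.inr _ => "YES"

-- ===== PORT B =====
def solve_alt (_n : Int) (k : Int) (a : List Int) (x : List Int) : String :=
  let monsters := (x.zip a).map (fun p => (|p.1|, p.2))
  -- the Python loop only ever early-returns the constant "NO": ported as List.any
  if monsters.any (fun q => decide (0 < q.1) &&
      decide (((monsters.filter (fun p => decide (0 < p.1) && decide (p.1 ≤ q.1))).map (·.2)).sum > k * q.1))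
  then "NO" else "YES"

-- ===== PRECONDITION & SPEC =====
def Spec_solve (n : Int) (k : Int) (a : List Int) (x : List Int) (out : String) : Prop := out = solve_alt n k a x
instance (n : Int) (k : Int) (a : List Int) (x : List Int) (out : String) : Decidable (Spec_solve n k a x out) := by unfold Spec_solve; infer_instance

-- ===== CLAIM (what is proved, stated in full; the proofs are below) =====
def Claim_equal_solve : Prop := ∀ (n : Int) (k : Int) (a : List Int) (x : List Int), Dom_solve n k a x → Spec_solve n k a x (solve n k a x)

-- ===== LEMMAS AND PROOFS =====

-- generic early-return fold state
def pvFinish (st : Sum String Int) : String :=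
  match st with
  | Sum.inl s => s
  | Sum.inr _ => "YES"

-- abstract A-side loop step over (previous key, key) pairs
def pvStepA (k : Int) (S : Int → Int) (st : Sum String Int) (p : Int × Int) : Sum String Int :=
  match st with
  | Sum.inl s => Sum.inl s
  | Sum.inr bullet =>
    if S p.2 > (p.2 - p.1) * k + bullet then Sum.inl "NO"
    else Sum.inr ((p.2 - p.1) * k + bullet - S p.2)

-- telescoped form of A's loop, over keys with a cumulative-health accumulator
def pvStepB (k : Int) (S : Int → Int) (st : Sum String Int) (c : Int) : Sum String Int :=
  match st with
  | Sum.inl s => Sum.inl s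
  | Sum.inr acc =>
    if acc + S c > k * c then Sum.inl "NO" else Sum.inr (acc + S c)

lemma foldl_stepA_inl (k : Int) (S : Int → Int) (l : List (Int × Int)) (s : String) :
    l.foldl (pvStepA k S) (Sum.inl s) = Sum.inl s := by
  induction l with
  | nil => rfl
  | cons p t ih => simpa [pvStepA] using ih

lemma foldl_stepB_inl (k : Int) (S : Int → Int) (l : List Int) (s : String) :
    l.foldl (pvStepB k S) (Sum.inl s) = Sum.inl s := by
  induction l with
  | nil => rfl
  | cons c t ih => simpa [pvStepB] using ih

-- the bullet recurrence telescopes into the prefix-sum threshold test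
lemma loops_eq (k : Int) (S : Int → Int) :
    ∀ (ks : List Int) (prev bullet acc : Int), bullet + acc = k * prev →
      pvFinish (((prev :: ks).zip ks).foldl (pvStepA k S) (Sum.inr bullet))
        = pvFinish (ks.foldl (pvStepB k S) (Sum.inr acc)) := by
  intro ks
  induction ks with
  | nil => intro prev bullet acc h; rfl
  | cons c rest ih =>
    intro prev bullet acc h
    have hX : (c - prev) * k + bullet = k * c - acc := by linear_combination h
    have hcond : (S c > (c - prev) * k + bullet) ↔ (acc + S c > k * c) := by
      rw [hX]; constructor <;> intro <;> linarith
    simp only [List.zip_cons_cons, List.foldl_cons, pvStepA, pvStepB]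
    by_cases hc : acc + S c > k * c
    · rw [if_pos (hcond.mpr hc), if_pos hc, foldl_stepA_inl, foldl_stepB_inl]
    · rw [if_neg (fun h' => hc (hcond.mp h')), if_neg hc]
      exact ih c ((c - prev) * k + bullet - S c) (acc + S c) (by linear_combination hX)

-- the early-return sweep says "NO" exactly when some key violates the cumulative threshold
lemma stepB_no_iff (k : Int) (S : Int → Int) :
    ∀ (ks : List Int), ks.Pairwise (· < ·) → ∀ (acc : Int),
      (ks.foldl (pvStepB k S) (Sum.inr acc) = Sum.inl "NO")
        ↔ ∃ c ∈ ks, acc + ((ks.filter (fun c' => decide (c' ≤ c))).map S).sum > k * c := by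
  intro ks
  induction ks with
  | nil => intro _ acc; simp
  | cons c rest ih =>
    intro hpw acc
    rw [List.pairwise_cons] at hpw
    obtain ⟨hlt, hrest⟩ := hpw
    have hfc : rest.filter (fun c' => decide (c' ≤ c)) = [] := by
      rw [List.filter_eq_nil_iff]
      intro e he
      simpa using not_le_of_gt (hlt e he)
    simp only [List.foldl_cons, pvStepB]
    by_cases hc : acc + S c > k * c
    · rw [if_pos hc]
      constructor
      · intro _
        refine ⟨c, List.mem_cons_self, ?_⟩
        simp only [List.filter_cons, decide_eq_true_eq]
        rw [if_pos (le_refl c), hfc]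
        simpa using hc
      · intro _; exact foldl_stepB_inl k S rest "NO"
    · rw [if_neg hc, ih hrest (acc + S c)]
      constructor
      · rintro ⟨e, he, hgt⟩
        refine ⟨e, List.mem_cons_of_mem c he, ?_⟩
        simp only [List.filter_cons, decide_eq_true_eq]
        rw [if_pos (le_of_lt (hlt e he))]
        simp only [List.map_cons, List.sum_cons]
        linarith
      · rintro ⟨e, he, hgt⟩
        rcases List.mem_cons.mp he with rfl | he'
        · exfalso
          simp only [List.filter_cons, decide_eq_true_eq] at hgt
          rw [if_pos (le_refl e), hfc] at hgt
          simp only [List.map_cons, List.map_nil, List.sum_cons, List.sum_nil, add_zero] at hgt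
          exact hc hgt
        · refine ⟨e, he', ?_⟩
          simp only [List.filter_cons, decide_eq_true_eq] at hgt
          rw [if_pos (le_of_lt (hlt e he'))] at hgt
          simp only [List.map_cons, List.sum_cons] at hgt
          linarith

-- the sweep never produces an inl other than "NO"
lemma stepB_result (k : Int) (S : Int → Int) :
    ∀ (ks : List Int) (acc : Int),
      ks.foldl (pvStepB k S) (Sum.inr acc) = Sum.inl "NO"
        ∨ ∃ b, ks.foldl (pvStepB k S) (Sum.inr acc) = Sum.inr b := by
  intro ks
  induction ks with
  | nil => intro acc; exact Or.inr ⟨acc, rfl⟩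
  | cons c rest ih =>
    intro acc
    simp only [List.foldl_cons, pvStepB]
    by_cases hc : acc + S c > k * c
    · rw [if_pos hc]; exact Or.inl (foldl_stepB_inl k S rest "NO")
    · rw [if_neg hc]; exact ih (acc + S c)

-- sum over a filter of a disjunction of disjoint predicates splits
lemma sum_map_filter_or {α : Type} (f : α → Int) (q1 q2 : α → Bool)
    (h : ∀ p, ¬(q1 p = true ∧ q2 p = true)) :
    ∀ (l : List α),
      ((l.filter (fun p => q1 p || q2 p)).map f).sum
        = ((l.filter q1).map f).sum + ((l.filter q2).map f).sum := by
  intro l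
  induction l with
  | nil => simp
  | cons p t ih =>
    simp only [List.filter_cons]
    cases h1 : q1 p <;> cases h2 : q2 p
    · simp [ih]
    · simp [ih]; ring
    · simp [ih]; ring
    · exact absurd ⟨h1, h2⟩ (h p)

-- per-key health sums over a nodup key list collapse into one filtered sum over the pairs
lemma sum_fibers (P : List (Int × Int)) (c : Int) :
    ∀ (l : List Int), l.Nodup →
      ((l.filter (fun c' => decide (c' ≤ c))).map
          (fun c' => ((P.filter (fun p => decide (|p.1| = c'))).map (·.2)).sum)).sum
        = ((P.filter (fun p => decide (|p.1| ∈ l) && decide (|p.1| ≤ c))).map (·.2)).sum := by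
  intro l
  induction l with
  | nil => intro _; simp
  | cons e t ih =>
    intro hnd
    rw [List.nodup_cons] at hnd
    obtain ⟨hnot, hnd'⟩ := hnd
    have hsplit := sum_map_filter_or (·.2)
      (fun p : Int × Int => decide (|p.1| = e) && decide (|p.1| ≤ c))
      (fun p : Int × Int => decide (|p.1| ∈ t) && decide (|p.1| ≤ c))
      (by
        rintro p ⟨h1, h2⟩
        simp only [Bool.and_eq_true, decide_eq_true_eq] at h1 h2
        exact hnot (h1.1 ▸ h2.1)) P
    have hpred : (P.filter (fun p => decide (|p.1| ∈ e :: t) && decide (|p.1| ≤ c)))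
        = P.filter (fun p => (decide (|p.1| = e) && decide (|p.1| ≤ c))
            || (decide (|p.1| ∈ t) && decide (|p.1| ≤ c))) := by
      apply List.filter_congr
      intro p _
      by_cases hA : |p.1| = e <;> by_cases hB : |p.1| ∈ t <;> by_cases hC : |p.1| ≤ c <;>
        simp [List.mem_cons, hA, hB, hC]
    rw [hpred, hsplit, ← ih hnd']
    simp only [List.filter_cons]
    by_cases he : e ≤ c
    · rw [if_pos (by simpa using he)]
      simp only [List.map_cons, List.sum_cons]
      have hfeq : P.filter (fun p => decide (|p.1| = e) && decide (|p.1| ≤ c))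
          = P.filter (fun p => decide (|p.1| = e)) := by
        apply List.filter_congr
        intro p _
        by_cases hA : |p.1| = e
        · simp [hA, he]
        · simp [hA]
      rw [hfeq]
    · rw [if_neg (by simpa using he)]
      have : P.filter (fun p => decide (|p.1| = e) && decide (|p.1| ≤ c)) = [] := by
        rw [List.filter_eq_nil_iff]
        intro p _
        simp only [Bool.and_eq_true, decide_eq_true_eq, not_and]
        intro h1; exact h1 ▸ he
      rw [this]
      simp

-- index loop over range(1, len(xs)) reading xs[i-1], xs[i] = fold over adjacent pairs
lemma foldl_range_adj {σ : Type} (f : σ → Int → Int → σ) :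
    ∀ (xs : List Int) (s : σ),
      (List.range (xs.length - 1)).foldl (fun st j => f st (xs.getD j 0) (xs.getD (j + 1) 0)) s
        = (xs.zip xs.tail).foldl (fun st p => f st p.1 p.2) s := by
  intro xs
  induction xs with
  | nil => intro s; rfl
  | cons u t ih =>
    intro s
    cases t with
    | nil => rfl
    | cons v t' =>
      simp only [List.length_cons, Nat.add_sub_cancel, List.range_succ_eq_map,
        List.foldl_cons, List.foldl_map, List.tail_cons, List.zip_cons_cons]
      have := ih (s := f s u v)
      simp only [List.length_cons, Nat.add_sub_cancel, List.tail_cons] at this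
      rw [← this]
      rfl

lemma foldl_pyRange_adj {σ : Type} (xs : List Int) (f : σ → Int → Int → σ) (s : σ) :
    (PySem.List.pyRange 1 (xs.length : Int) 1).foldl
      (fun st i => f st (PySem.List.pyGetD xs (i - 1) 0) (PySem.List.pyGetD xs i 0)) s
      = (xs.zip xs.tail).foldl (fun st p => f st p.1 p.2) s := by
  rw [PySem.List.pyRange_one, List.foldl_map]
  have hn : ((xs.length : Int) - 1).toNat = xs.length - 1 := by omega
  rw [hn, ← foldl_range_adj f xs s]
  apply PySem.List.foldl_congr_mem
  intro acc j hj
  have h1 : (1 : Int) + (j : Int) - 1 = ((j : Nat) : Int) := by ring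
  have h2 : (1 : Int) + (j : Int) = (((j + 1 : Nat)) : Int) := by push_cast; ring
  rw [h1, h2, PySem.List.pyGetD_natCast, PySem.List.pyGetD_natCast]

-- value of the add-aggregation dict fold
lemma getD_agg :
    ∀ (l : List (Int × Int)) (d : PySem.Dict Int Int) (c : Int),
      (l.foldl (fun d p => d.insert p.1 (d.getD p.1 0 + p.2)) d).getD c 0
        = d.getD c 0 + ((l.filter (fun p => p.1 = c)).map (·.2)).sum := by
  intro l
  induction l with
  | nil => intro d c; simp
  | cons p t ih =>
    intro d c
    rw [List.foldl_cons, ih]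
    by_cases hc : p.1 = c
    · simp [hc]
      ring
    · simp [hc, PySem.Dict.getD_insert, Ne.symm hc]

-- A's if-contains-then-add-else-set loop IS the add-aggregation fold
lemma dictA_eq_agg (l : List (Int × Int)) :
    l.foldl (fun d p =>
        if d.contains p.1 then d.insert p.1 (d.getD p.1 0 + p.2)
        else d.insert p.1 p.2) PySem.Dict.empty
      = l.foldl (fun d p => d.insert p.1 (d.getD p.1 0 + p.2)) PySem.Dict.empty := by
  apply PySem.List.foldl_congr_mem
  intro d p _
  by_cases h : d.contains p.1
  · rw [if_pos h]
  · rw [if_neg (by simp [h]), PySem.Dict.getD_of_not_contains d 0 (by simpa using h), zero_add]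

-- Set.ofList keeps a sublist of its input (first occurrences in order)
lemma ofList_sublist : ∀ (xs : List Int), (PySem.Set.ofList xs).Sublist xs := by
  intro xs
  induction xs with
  | nil => simp [PySem.Set.ofList, PySem.Set.empty]
  | cons y t ih =>
    rw [PySem.Set.ofList_cons]
    exact List.Sublist.cons₂ y ((List.filter_sublist).trans ih)

lemma pairwise_lt_ofList (xs : List Int) (h : xs.Pairwise (· ≤ ·)) :
    (PySem.Set.ofList xs).Pairwise (· < ·) := by
  have hle : (PySem.Set.ofList xs).Pairwise (· ≤ ·) := h.sublist (ofList_sublist xs)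
  have hne : (PySem.Set.ofList xs).Pairwise (· ≠ ·) := PySem.Set.nodup_ofList xs
  exact (hle.and hne).imp (fun ⟨h1, h2⟩ => lt_of_le_of_ne h1 h2)

-- insertion with sorted2's lexicographic 'before' keeps the first components sorted
lemma insertBy_fst_pairwise (x : Int × Int) :
    ∀ (ys : List (Int × Int)), ys.Pairwise (fun a b => a.1 ≤ b.1) →
      (PySem.List.insertBy
        (fun a b => decide (a.1 < b.1) || (!decide (b.1 < a.1) && decide (a.2 < b.2))) x ys).Pairwise
        (fun a b => a.1 ≤ b.1) := by
  intro ys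
  induction ys with
  | nil => intro _; simp [PySem.List.insertBy]
  | cons y t ih =>
    intro h
    rw [List.pairwise_cons] at h
    obtain ⟨hy, ht⟩ := h
    unfold PySem.List.insertBy
    by_cases hb : (decide (x.1 < y.1) || (!decide (y.1 < x.1) && decide (x.2 < y.2))) = true
    · simp only [hb, if_true]
      have hxy : x.1 ≤ y.1 := by
        simp only [Bool.or_eq_true, Bool.and_eq_true, Bool.not_eq_true', decide_eq_true_eq,
          decide_eq_false_iff_not] at hb
        rcases hb with h1 | ⟨h1, _⟩
        · exact le_of_lt h1
        · exact le_of_not_gt h1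
      refine List.Pairwise.cons ?_ (List.Pairwise.cons hy ht)
      intro z hz
      rcases List.mem_cons.mp hz with rfl | hz'
      · exact hxy
      · exact hxy.trans (hy z hz')
    · simp only [hb]
      refine List.Pairwise.cons ?_ (ih ht)
      intro z hz
      rcases (PySem.List.insertBy_mem_iff _ x z t).mp hz with rfl | hz'
      · simp only [Bool.or_eq_true, Bool.and_eq_true, Bool.not_eq_true', decide_eq_true_eq,
          decide_eq_false_iff_not, not_or, not_and] at hb
        exact le_of_not_gt hb.1
      · exact hy z hz'

lemma sorted2_fst_pairwise (l : List (Int × Int)) :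
    (PySem.List.sorted2 l (·.1) (·.2)).Pairwise (fun a b => a.1 ≤ b.1) := by
  unfold PySem.List.sorted2
  simp only [if_neg (by simp : ¬ (false = true))]
  generalize hacc : ([] : List (Int × Int)) = acc
  have hp : acc.Pairwise (fun a b : Int × Int => a.1 ≤ b.1) := by rw [← hacc]; simp
  clear hacc
  induction l generalizing acc with
  | nil => simpa using hp
  | cons p t ih => exact ih _ (insertBy_fst_pairwise p acc hp)

-- keyed aggregation: getD of the fold is the per-key filtered sum
lemma getD_aggKey (key : (Int × Int) → Int) (l : List (Int × Int)) (c : Int) :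
    (l.foldl (fun d q => d.insert (key q) (d.getD (key q) 0 + q.2)) PySem.Dict.empty).getD c 0
      = ((l.filter (fun q => key q = c)).map (·.2)).sum := by
  have h := getD_agg (l.map (fun q => (key q, q.2))) PySem.Dict.empty c
  rw [List.foldl_map] at h
  simpa [List.filter_map, List.map_map, Function.comp_def] using h

-- two strictly increasing permutations coincide
lemma strict_sorted_perm_eq {l₁ l₂ : List Int} (hp : l₁.Perm l₂)
    (h1 : l₁.Pairwise (· < ·)) (h2 : l₂.Pairwise (· < ·)) : l₁ = l₂ := by
  refine List.Perm.eq_of_pairwise ?_ h1 h2 hp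
  intro a b _ _ hab hba
  exact absurd hba (not_lt_of_gt hab)

theorem solve_spec_aux (n : Int) (k : Int) (a : List Int) (x : List Int) :
    solve n k a x = solve_alt n k a x := by
  simp only [solve, solve_alt]
  -- shared data
  set P := x.zip a with hP
  set S : Int → Int := fun c => ((P.filter (fun p => decide (|p.1| = c))).map (·.2)).sum with hS
  set T : Int → Int :=
    fun c => ((P.filter (fun p => decide (0 < |p.1|) && decide (|p.1| ≤ c))).map (·.2)).sum with hT
  -- ---------- A side ----------
  have hzip : (x.map (fun v => |v|)).zip a = P.map (fun p => (|p.1|, p.2)) := by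
    rw [hP, List.zip_map_left]
    apply List.map_congr_left
    intro p _
    rfl
  set lA := PySem.List.sorted2 ((x.map (fun v => |v|)).zip a ++ [((0 : Int), (0 : Int))]) (·.1) (·.2) with hlA
  have hpermA : lA.Perm (P.map (fun p => (|p.1|, p.2)) ++ [((0 : Int), (0 : Int))]) := by
    rw [hlA, hzip]
    exact PySem.List.sorted2_perm _ _ _ _
  set dA := lA.foldl (fun d p =>
      if d.contains p.1 then d.insert p.1 (d.getD p.1 0 + p.2)
      else d.insert p.1 p.2) PySem.Dict.empty with hdA
  have hdA' : dA = lA.foldl (fun d p => d.insert p.1 (d.getD p.1 0 + p.2)) PySem.Dict.empty :=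
    dictA_eq_agg lA
  have hgetA : ∀ c, dA.getD c 0 = S c := by
    intro c
    rw [hdA', getD_aggKey (fun p => p.1) lA c]
    have hflt := (hpermA.filter (fun q => decide (q.1 = c)))
    have hsum := ((hflt.map (·.2)).sum_eq)
    rw [hsum, List.filter_append, List.map_append, List.sum_append, List.filter_map]
    have h0 : ((List.filter (fun q => decide (q.1 = c)) [((0 : Int), (0 : Int))]).map (·.2)).sum = 0 := by
      by_cases hc : (0 : Int) = c <;> simp [hc]
    rw [h0, add_zero, hS, List.map_map]
    rfl
  have hkeysA : dA.keys = PySem.Set.ofList (lA.map (·.1)) := by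
    rw [hdA']
    rw [PySem.Dict.keys_foldl_insert_key lA (fun p => p.1) (fun d p => d.getD p.1 0 + p.2) PySem.Dict.empty]
    rw [PySem.Dict.keys_empty, PySem.Set.update_nil_left]
  have hkApw : dA.keys.Pairwise (· < ·) := by
    rw [hkeysA]
    apply pairwise_lt_ofList
    have := sorted2_fst_pairwise ((x.map (fun v => |v|)).zip a ++ [((0 : Int), (0 : Int))])
    rw [← hlA] at this
    exact (List.pairwise_map).mpr this
  -- ---------- the sorted distinct positive coordinates ----------
  set F := P.filter (fun q => decide (|q.1| ≠ 0)) with hF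
  set ks := PySem.List.sorted (PySem.Set.ofList (F.map (fun q => |q.1|))) (fun c => c) with hks
  have hkspw : ks.Pairwise (· < ·) := by
    rw [hks]
    exact PySem.List.sorted_ofList_pairwise_lt _
  have hksmem : ∀ c, c ∈ ks ↔ ∃ p ∈ P, |p.1| ≠ 0 ∧ |p.1| = c := by
    intro c
    rw [hks, PySem.List.mem_sorted, PySem.Set.mem_ofList, List.mem_map]
    constructor
    · rintro ⟨q, hq, rfl⟩
      rw [hF, List.mem_filter] at hq
      exact ⟨q, hq.1, by simpa using hq.2, rfl⟩
    · rintro ⟨p, hp, hne, rfl⟩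
      exact ⟨p, by rw [hF, List.mem_filter]; exact ⟨hp, by simpa using hne⟩, rfl⟩
  have hkspos : ∀ c ∈ ks, (0 : Int) < c := by
    intro c hc
    obtain ⟨p, _, hne, hec⟩ := (hksmem c).mp hc
    have := abs_nonneg p.1
    omega
  -- ---------- the two key lists ----------
  have hkeys : dA.keys = 0 :: ks := by
    apply strict_sorted_perm_eq ?_ hkApw
    · exact List.Pairwise.cons (fun c hc => hkspos c hc) hkspw
    · rw [(List.perm_ext_iff_of_nodup ?nd1 ?nd2)]
      case nd1 => exact hkApw.imp ne_of_lt
      case nd2 =>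
        exact (List.Pairwise.cons (fun c hc => hkspos c hc) hkspw).imp ne_of_lt
      intro c
      rw [hkeysA, PySem.Set.mem_ofList, List.mem_map]
      have hmemA : (∃ p ∈ lA, p.1 = c) ↔ (∃ p ∈ P, |p.1| = c) ∨ c = 0 := by
        constructor
        · rintro ⟨p, hp, rfl⟩
          have := hpermA.mem_iff.mp hp
          rw [List.mem_append] at this
          rcases this with h | h
          · obtain ⟨q, hq, rfl⟩ := List.mem_map.mp h
            exact Or.inl ⟨q, hq, rfl⟩
          · simp only [List.mem_singleton] at h
            subst h
            exact Or.inr rfl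
        · rintro (⟨p, hp, hc⟩ | rfl)
          · refine ⟨(|p.1|, p.2), hpermA.mem_iff.mpr ?_, hc⟩
            exact List.mem_append.mpr (Or.inl (List.mem_map.mpr ⟨p, hp, rfl⟩))
          · exact ⟨((0 : Int), (0 : Int)), hpermA.mem_iff.mpr (List.mem_append.mpr (Or.inr (by simp))), rfl⟩
      rw [List.mem_cons, hksmem c, hmemA]
      by_cases h0 : c = 0
      · simp [h0]
      · constructor
        · rintro (⟨p, hp, he⟩ | he)
          · have hne : |p.1| ≠ 0 := by rw [he]; exact h0
            exact Or.inr ⟨p, hp, hne, he⟩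
          · exact Or.inl he
        · rintro (he | ⟨p, hp, hne, he⟩)
          · exact Or.inr he
          · exact Or.inl ⟨p, hp, he⟩
  -- ---------- A's index loop = telescoped sweep over ks ----------
  have hAloop :
      (PySem.List.pyRange 1 (dA.keys.length : Int) 1).foldl (fun st i =>
        match st with
        | Sum.inl s => Sum.inl s
        | Sum.inr bullet =>
          if dA.getD (PySem.List.pyGetD dA.keys i 0) 0 >
              (PySem.List.pyGetD dA.keys i 0 - PySem.List.pyGetD dA.keys (i - 1) 0) * k + bullet
          then Sum.inl "NO"
          else Sum.inr ((PySem.List.pyGetD dA.keys i 0 - PySem.List.pyGetD dA.keys (i - 1) 0) * k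
                + bullet - dA.getD (PySem.List.pyGetD dA.keys i 0) 0)) (Sum.inr (0 : Int))
        = (dA.keys.zip dA.keys.tail).foldl (pvStepA k S) (Sum.inr (0 : Int)) := by
    have hbody : (fun (st : Sum String Int) (i : Int) =>
        match st with
        | Sum.inl s => Sum.inl s
        | Sum.inr bullet =>
          if dA.getD (PySem.List.pyGetD dA.keys i 0) 0 >
              (PySem.List.pyGetD dA.keys i 0 - PySem.List.pyGetD dA.keys (i - 1) 0) * k + bullet
          then Sum.inl "NO"
          else Sum.inr ((PySem.List.pyGetD dA.keys i 0 - PySem.List.pyGetD dA.keys (i - 1) 0) * k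
                + bullet - dA.getD (PySem.List.pyGetD dA.keys i 0) 0))
        = (fun st i => pvStepA k S st
            (PySem.List.pyGetD dA.keys (i - 1) 0, PySem.List.pyGetD dA.keys i 0)) := by
      funext st i
      cases st with
      | inl s => rfl
      | inr bullet => simp only [pvStepA, hgetA]
    rw [hbody, foldl_pyRange_adj dA.keys (fun st kim ki => pvStepA k S st (kim, ki)) (Sum.inr 0)]
  -- ---------- the cumulative sum at a key of ks is T ----------
  have hcum : ∀ c ∈ ks, ((ks.filter (fun c' => decide (c' ≤ c))).map S).sum = T c := by
    intro c _
    have hnd : ks.Nodup := hkspw.imp ne_of_lt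
    rw [hS, sum_fibers P c ks hnd, hT]
    have hfeq : P.filter (fun p => decide (|p.1| ∈ ks) && decide (|p.1| ≤ c))
        = P.filter (fun p => decide (0 < |p.1|) && decide (|p.1| ≤ c)) := by
      apply List.filter_congr
      intro p hp
      have hmem : |p.1| ∈ ks ↔ 0 < |p.1| := by
        rw [hksmem]
        constructor
        · rintro ⟨q, _, hne, he⟩
          have := abs_nonneg q.1
          omega
        · intro hpos
          exact ⟨p, hp, by omega, rfl⟩
      by_cases h2 : 0 < |p.1| <;> simp [hmem, h2]
    rw [hfeq]
  -- ---------- the two existentials coincide ----------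
  have hiff : (∃ c ∈ ks, 0 + T c > k * c)
      ↔ ∃ q ∈ P.map (fun p => (|p.1|, p.2)), 0 < q.1 ∧ T q.1 > k * q.1 := by
    constructor
    · rintro ⟨c, hc, hgt⟩
      obtain ⟨p, hp, hne, he⟩ := (hksmem c).mp hc
      refine ⟨(|p.1|, p.2), List.mem_map.mpr ⟨p, hp, rfl⟩, ?_, ?_⟩
      · have := abs_nonneg p.1; simp only; omega
      · simpa [he] using hgt
    · rintro ⟨q, hq, hpos, hgt⟩
      obtain ⟨p, hp, rfl⟩ := List.mem_map.mp hq
      refine ⟨|p.1|, (hksmem _).mpr ⟨p, hp, by simpa using ne_of_gt hpos, rfl⟩, ?_⟩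
      simpa using hgt
  -- ---------- B side: its filtered sum over monsters is T ----------
  have hBsum : ∀ c : Int,
      (((P.map (fun p => (|p.1|, p.2))).filter
          (fun p => decide (0 < p.1) && decide (p.1 ≤ c))).map (·.2)).sum = T c := by
    intro c
    rw [List.filter_map, List.map_map, hT]
    rfl
  -- ---------- finish ----------
  rw [hAloop, hkeys, List.tail_cons]
  show pvFinish (((0 :: ks).zip ks).foldl (pvStepA k S) (Sum.inr (0 : Int))) = _
  rw [loops_eq k S ks 0 0 0 (by ring)]
  by_cases hex : ∃ c ∈ ks, 0 + T c > k * c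
  · have hno : ks.foldl (pvStepB k S) (Sum.inr 0) = Sum.inl "NO" := by
      rw [stepB_no_iff k S ks hkspw 0]
      obtain ⟨c, hc, hgt⟩ := hex
      exact ⟨c, hc, by rw [hcum c hc]; exact hgt⟩
    have hany : (P.map (fun p => (|p.1|, p.2))).any (fun q => decide (0 < q.1) &&
        decide ((((P.map (fun p => (|p.1|, p.2))).filter
          (fun p => decide (0 < p.1) && decide (p.1 ≤ q.1))).map (·.2)).sum > k * q.1)) = true := by
      rw [List.any_eq_true]
      obtain ⟨q, hq, hpos, hgt⟩ := hiff.mp hex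
      exact ⟨q, hq, by simp only [Bool.and_eq_true, decide_eq_true_eq, hBsum]; exact ⟨hpos, hgt⟩⟩
    rw [hno, if_pos hany]
    rfl
  · have hnotno : ks.foldl (pvStepB k S) (Sum.inr 0) ≠ Sum.inl "NO" := by
      rw [Ne, stepB_no_iff k S ks hkspw 0]
      intro hc
      obtain ⟨c, hcm, hgt⟩ := hc
      exact hex ⟨c, hcm, by rw [← hcum c hcm]; exact hgt⟩
    have hany : (P.map (fun p => (|p.1|, p.2))).any (fun q => decide (0 < q.1) &&
        decide ((((P.map (fun p => (|p.1|, p.2))).filter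
          (fun p => decide (0 < p.1) && decide (p.1 ≤ q.1))).map (·.2)).sum > k * q.1)) = false := by
      rw [Bool.eq_false_iff, Ne, List.any_eq_true]
      rintro ⟨q, hq, hcond⟩
      simp only [Bool.and_eq_true, decide_eq_true_eq, hBsum] at hcond
      exact hex (hiff.mpr ⟨q, hq, hcond.1, hcond.2⟩)
    rw [hany]
    rcases stepB_result k S ks 0 with h | ⟨b, h⟩
    · exact absurd h hnotno
    · rw [h]
      rfl

-- ===== VERDICT (by name: the statement is the Claim_ definition above) =====
theorem solve_spec : Claim_equal_solve := by
  intro n k a x _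
  exact solve_spec_aux n k a x
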